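-- pv_equiv track=rewrite | github.com/shrango/transformer | utils/fmt/base.py | maxfreq_filter_core
-- ===== SOURCE A (Python) =====
-- def maxfreq_filter_core(ls, lt):
--
-- 	tmp = {}
-- 	for us, ut in zip(ls, lt):
-- 		if us in tmp:
-- 			tmp[us][ut] = tmp[us].get(ut, 0) + 1
-- 		else:
-- 			tmp[us] = {ut: 1}
--
-- 	rls, rlt = [], []
-- 	for tus, tlt in tmp.items():
-- 		_rs = []
-- 		_maxf = 0
-- 		for key, value in tlt.items():
-- 			if value > _maxf:
-- 				_maxf = value
-- 				_rs = [key]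
-- 			elif value == _maxf:
-- 				_rs.append(key)
-- 		for tut in _rs:
-- 			rls.append(tus)
-- 			rlt.append(tut)
--
-- 	return rls, rlt
-- ===== SOURCE B (Python) =====
-- def maxfreq_filter_core(ls, lt):
--     # Dict-free quadratic re-implementation: walk the pair list once; the first time a
--     # source is seen, rescan the pairs to collect its distinct targets in order and
--     # recount each (source, target) pair with list.count, keeping the max-count targets.
--     pairs = list(zip(ls, lt))
--     done = []
--     rls, rlt = [], []
--     for s, _ in pairs:
--         if s in done:
--             continue
--         done.append(s)
--         targets = []
--         for s2, t in pairs: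
--             if s2 == s and t not in targets:
--                 targets.append(t)
--         m = max(pairs.count((s, t)) for t in targets)
--         for t in targets:
--             if pairs.count((s, t)) == m:
--                 rls.append(s)
--                 rlt.append(t)
--     return rls, rlt
-- ===== Notes on version B (the rewrite author's own statement) =====
-- stated objective: alternative
-- what changed: B drops all dictionaries: it folds once over the zipped pairs carrying a plain 'done' list of processed sources, and for each new source rescans the pair list to collect its distinct targets and recounts each (source,target) pair with list.count, keeping targets whose recomputed count equals the max; A instead builds a nested dict of counters in one pass and selects with a running-max accumulator.
import Mathlib
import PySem

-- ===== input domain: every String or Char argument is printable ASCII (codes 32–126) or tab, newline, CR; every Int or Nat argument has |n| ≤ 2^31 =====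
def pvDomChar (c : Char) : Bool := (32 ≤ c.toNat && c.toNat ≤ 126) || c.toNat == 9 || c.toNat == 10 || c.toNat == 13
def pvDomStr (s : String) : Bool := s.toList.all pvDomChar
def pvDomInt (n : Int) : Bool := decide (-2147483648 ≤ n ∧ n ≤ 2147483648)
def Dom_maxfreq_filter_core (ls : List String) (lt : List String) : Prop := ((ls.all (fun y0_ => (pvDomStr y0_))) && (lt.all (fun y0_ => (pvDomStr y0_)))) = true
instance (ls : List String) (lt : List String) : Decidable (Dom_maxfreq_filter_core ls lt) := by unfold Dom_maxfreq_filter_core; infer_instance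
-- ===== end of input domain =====

-- B is a dict-free alternative: one fold over the pairs with a 'done' list, rescanning
-- the pair list per new source and recounting with list.count (no hash tables, not faster).

-- ===== PORT A =====
-- grouping step: tmp[us][ut] = tmp[us].get(ut, 0) + 1  /  tmp[us] = {ut: 1}
def pvStepA (tmp : PySem.Dict String (PySem.Dict String Int)) (p : String × String) :
    PySem.Dict String (PySem.Dict String Int) :=
  if tmp.contains p.1 then
    tmp.insert p.1 ((tmp.getD p.1 PySem.Dict.empty).insert p.2
      ((tmp.getD p.1 PySem.Dict.empty).getD p.2 0 + 1))
  else
    tmp.insert p.1 (PySem.Dict.empty.insert p.2 1)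

-- running-max accumulator over tlt.items: (_rs, _maxf)
def pvSelStep (acc : List String × Int) (kv : String × Int) : List String × Int :=
  if kv.2 > acc.2 then ([kv.1], kv.2)
  else if kv.2 == acc.2 then (acc.1 ++ [kv.1], acc.2)
  else acc

def maxfreq_filter_core (ls : List String) (lt : List String) : List String × List String :=
  let tmp := (ls.zip lt).foldl pvStepA PySem.Dict.empty
  tmp.items.foldl
    (fun r pr =>
      let sel := (pr.2.items.foldl pvSelStep (([] : List String), (0 : Int))).1
      sel.foldl (fun r t => (r.1 ++ [pr.1], r.2 ++ [t])) r)
    ([], [])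

-- ===== PORT B =====
-- body of the 'for s, _ in pairs' loop once s is known to be new:
-- collect the distinct targets of s in order, recount each pair, emit the max-count ones
def pvBodyB (pairs : List (String × String)) (r : List String × List String) (s : String) :
    List String × List String :=
  let targets := pairs.foldl
    (fun ts q => if q.1 == s && !(ts.contains q.2) then ts ++ [q.2] else ts)
    ([] : List String)
  -- max(...) over a generator: when this line runs, s comes from pairs, so targets ≠ []
  -- and the .getD 0 default of the empty-list case is never used (Python's max never raises here)
  let m := (PySem.List.max? (targets.map (fun t => (PySem.List.count pairs (s, t) : Int))) (fun y => y)).getD 0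
  targets.foldl
    (fun r t => if (PySem.List.count pairs (s, t) : Int) == m then (r.1 ++ [s], r.2 ++ [t]) else r) r

-- the outer loop step: skip sources already in 'done', else append to done and run the body
def pvStepB (pairs : List (String × String))
    (st : List String × (List String × List String)) (p : String × String) :
    List String × (List String × List String) :=
  if st.1.contains p.1 then st
  else (st.1 ++ [p.1], pvBodyB pairs st.2 p.1)

def maxfreq_filter_core_alt (ls : List String) (lt : List String) : List String × List String :=
  let pairs := ls.zip lt
  (pairs.foldl (pvStepB pairs) (([] : List String), (([] : List String), ([] : List String)))).2

-- ===== PRECONDITION & SPEC =====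
def Spec_maxfreq_filter_core (ls : List String) (lt : List String) (out : List String × List String) : Prop := out = maxfreq_filter_core_alt ls lt
instance (ls : List String) (lt : List String) (out : List String × List String) : Decidable (Spec_maxfreq_filter_core ls lt out) := by unfold Spec_maxfreq_filter_core; infer_instance

-- ===== CLAIM (what is proved, stated in full; the proofs are below) =====
def Claim_equal_maxfreq_filter_core : Prop := ∀ (ls : List String) (lt : List String), Dom_maxfreq_filter_core ls lt → Spec_maxfreq_filter_core ls lt (maxfreq_filter_core ls lt)

-- ===== LEMMAS AND PROOFS =====

-- targets seen for source s, in first-occurrence order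
def pvTg (pairs : List (String × String)) (s : String) : List String :=
  PySem.List.dedup ((pairs.filter (fun q => q.1 == s)).map (·.2))

-- the (target, count) entries A's inner dict for s holds, characterized
def pvEntries (pairs : List (String × String)) (s : String) : List (String × Int) :=
  (pvTg pairs s).map (fun t => (t, (pairs.count (s, t) : Int)))

theorem pvDedup_append {α : Type} [BEq α] [LawfulBEq α] (xs : List α) (x : α) :
    PySem.List.dedup (xs ++ [x])
      = if x ∈ xs then PySem.List.dedup xs else PySem.List.dedup xs ++ [x] := by
  have h : PySem.List.dedup (xs ++ [x]) = PySem.Set.add (PySem.List.dedup xs) x := by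
    simp [PySem.List.dedup, PySem.Set.ofList, List.foldl_append]
  rw [h, PySem.Set.add]
  have hc : PySem.Set.contains (PySem.List.dedup xs) x = decide (x ∈ xs) := by
    simp [PySem.Set.contains]
  rw [hc]
  by_cases hx : x ∈ xs <;> simp [hx]

theorem pvEntries_append_ne (xs : List (String × String)) (p : String × String) (s : String)
    (h : s ≠ p.1) : pvEntries (xs ++ [p]) s = pvEntries xs s := by
  obtain ⟨p1, p2⟩ := p
  simp only at h
  unfold pvEntries pvTg
  have hf : (xs ++ [(p1, p2)]).filter (fun q => q.1 == s) = xs.filter (fun q => q.1 == s) := by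
    simp [List.filter_append, Ne.symm h]
  rw [hf]
  apply List.map_congr_left
  intro t _
  have hc : (xs ++ [(p1, p2)]).count (s, t) = xs.count (s, t) := by
    rw [List.count_append]
    have h0 : [(p1, p2)].count (s, t) = 0 := by
      simp [List.count_singleton, Prod.ext_iff]
      exact fun hh => absurd hh.symm h
    omega
  rw [hc]

-- inner-dict update for an existing source
theorem pvInner_step (xs : List (String × String)) (s0 t0 : String) :
    (PySem.Dict.mk (pvEntries xs s0)).insert t0
        ((PySem.Dict.mk (pvEntries xs s0)).getD t0 0 + 1)
      = PySem.Dict.mk (pvEntries (xs ++ [(s0, t0)]) s0) := by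
  have hkeys : (PySem.Dict.mk (pvEntries xs s0)).keys = pvTg xs s0 := by
    simp [PySem.Dict.keys, pvEntries, List.map_map, Function.comp_def]
  have hnd : (PySem.Dict.mk (pvEntries xs s0)).keys.Nodup := by
    rw [hkeys]; exact PySem.List.nodup_dedup _
  have htg : pvTg (xs ++ [(s0, t0)]) s0
      = if t0 ∈ (xs.filter (fun q => q.1 == s0)).map (·.2) then pvTg xs s0 else pvTg xs s0 ++ [t0] := by
    unfold pvTg
    rw [List.filter_append]
    simp only [List.filter_cons, List.filter_nil]
    rw [if_pos (by simp)]
    simp only [List.map_append, List.map_cons, List.map_nil]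
    exact pvDedup_append _ _
  have hcount : ∀ t : String, ((xs ++ [(s0, t0)]).count (s0, t) : Int)
      = (xs.count (s0, t) : Int) + (if t = t0 then 1 else 0) := by
    intro t
    rw [List.count_append]
    by_cases h : t = t0
    · subst h; simp
    · have h0 : [(s0, t0)].count (s0, t) = 0 := by
        simp [List.count_singleton, Prod.ext_iff]
        exact fun hh => h hh.symm
      rw [h0, if_neg h]
      push_cast
      ring
  have hcontains : (PySem.Dict.mk (pvEntries xs s0)).contains t0
      = decide (t0 ∈ pvTg xs s0) := by
    show (pvEntries xs s0).any (fun p => p.1 == t0) = _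
    unfold pvEntries
    rw [List.any_map, Bool.eq_iff_iff]
    simp only [List.any_eq_true, Function.comp_def, beq_iff_eq, decide_eq_true_eq]
    exact ⟨fun ⟨x, hx, he⟩ => he ▸ hx, fun h => ⟨t0, h, rfl⟩⟩
  by_cases hin : t0 ∈ (xs.filter (fun q => q.1 == s0)).map (·.2)
  · have hin' : t0 ∈ pvTg xs s0 := (PySem.List.mem_dedup _ _).mpr hin
    have hc : (PySem.Dict.mk (pvEntries xs s0)).contains t0 = true := by
      rw [hcontains]; simpa using hin'
    have hmem : (t0, (xs.count (s0, t0) : Int)) ∈ pvEntries xs s0 :=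
      List.mem_map_of_mem hin'
    have hget : (PySem.Dict.mk (pvEntries xs s0)).getD t0 0 = (xs.count (s0, t0) : Int) :=
      PySem.Dict.getD_of_mem_items _ hmem hnd 0
    rw [hget]
    apply PySem.Dict.ext
    rw [PySem.Dict.items_insert_of_contains _ _ hc]
    show _ = pvEntries (xs ++ [(s0, t0)]) s0
    unfold pvEntries
    rw [htg, if_pos hin]
    show ((pvTg xs s0).map (fun t => (t, (xs.count (s0, t) : Int)))).map _ = _
    rw [List.map_map]
    apply List.map_congr_left
    intro t ht
    by_cases h : t = t0
    · subst h; simp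
    · simp [h, Ne.symm h]
  · have hin' : t0 ∉ pvTg xs s0 := fun hh => hin ((PySem.List.mem_dedup _ _).mp hh)
    have hc : (PySem.Dict.mk (pvEntries xs s0)).contains t0 = false := by
      rw [hcontains]; simpa using hin'
    have hget : (PySem.Dict.mk (pvEntries xs s0)).getD t0 0 = 0 :=
      PySem.Dict.getD_of_not_contains _ 0 hc
    have hcnt0 : xs.count (s0, t0) = 0 := by
      rw [List.count_eq_zero]
      intro hmem
      have hmemf : (s0, t0) ∈ xs.filter (fun q => q.1 == s0) :=
        List.mem_filter.mpr ⟨hmem, by simp⟩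
      exact hin (List.mem_map_of_mem hmemf)
    rw [hget]
    apply PySem.Dict.ext
    rw [PySem.Dict.items_insert_of_not_contains _ _ hc]
    show pvEntries xs s0 ++ [(t0, 0 + 1)] = pvEntries (xs ++ [(s0, t0)]) s0
    unfold pvEntries
    rw [htg, if_neg hin, List.map_append]
    congr 1
    · apply List.map_congr_left
      intro t ht
      have hne : t ≠ t0 := fun hh => hin' (hh ▸ ht)
      have h0 : List.count (s0, t) [(s0, t0)] = 0 := by
        simp [List.count_singleton, Prod.ext_iff]
        exact fun hh => hne hh.symm
      simp [List.count_append, h0]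
    · simp [hcnt0]

-- A's grouping dict, characterized
theorem pvGroupA_items (pairs : List (String × String)) :
    (pairs.foldl pvStepA PySem.Dict.empty).items
      = (PySem.List.dedup (pairs.map (·.1))).map
          (fun s => (s, PySem.Dict.mk (pvEntries pairs s))) := by
  induction pairs using List.reverseRecOn with
  | nil => rfl
  | append_singleton xs p ih =>
    obtain ⟨s0, t0⟩ := p
    rw [List.foldl_append, List.foldl_cons, List.foldl_nil]
    have hkeys : (xs.foldl pvStepA PySem.Dict.empty).keys = PySem.List.dedup (xs.map (·.1)) := by
      show (xs.foldl pvStepA PySem.Dict.empty).items.map (·.1) = _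
      rw [ih, List.map_map]
      simp [Function.comp_def]
    have hnd : (xs.foldl pvStepA PySem.Dict.empty).keys.Nodup := by
      rw [hkeys]; exact PySem.List.nodup_dedup _
    have hcont : (xs.foldl pvStepA PySem.Dict.empty).contains s0 = decide (s0 ∈ xs.map (·.1)) := by
      show (xs.foldl pvStepA PySem.Dict.empty).items.any (fun q => q.1 == s0) = _
      rw [ih, List.any_map, Bool.eq_iff_iff]
      simp only [List.any_eq_true, Function.comp_def, beq_iff_eq, decide_eq_true_eq]
      constructor
      · rintro ⟨x, hx, he⟩
        exact (PySem.List.mem_dedup _ _).mp (he ▸ hx)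
      · intro h
        exact ⟨s0, (PySem.List.mem_dedup _ _).mpr h, rfl⟩
    have hfsts : (xs ++ [(s0, t0)]).map (·.1) = xs.map (·.1) ++ [s0] := by simp
    rw [hfsts, pvDedup_append]
    by_cases hm : s0 ∈ xs.map (·.1)
    · have hc : (xs.foldl pvStepA PySem.Dict.empty).contains s0 = true := by
        rw [hcont]; simpa using hm
      have hmem : (s0, PySem.Dict.mk (pvEntries xs s0)) ∈ (xs.foldl pvStepA PySem.Dict.empty).items := by
        rw [ih]; exact List.mem_map_of_mem ((PySem.List.mem_dedup _ _).mpr hm)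
      have hget : (xs.foldl pvStepA PySem.Dict.empty).getD s0 PySem.Dict.empty
          = PySem.Dict.mk (pvEntries xs s0) :=
        PySem.Dict.getD_of_mem_items _ hmem hnd _
      rw [if_pos hm]
      simp only [pvStepA]
      rw [if_pos hc, hget]
      rw [PySem.Dict.items_insert_of_contains _ _ hc, ih, List.map_map]
      apply List.map_congr_left
      intro s hs
      by_cases hss : s = s0
      · subst hss
        simp only [Function.comp_def, beq_self_eq_true, if_pos]
        rw [pvInner_step]
      · simp only [Function.comp_def]
        rw [if_neg (by simpa using hss)]
        rw [pvEntries_append_ne xs (s0, t0) s hss]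
    · have hc : (xs.foldl pvStepA PySem.Dict.empty).contains s0 = false := by
        rw [hcont]; simpa using hm
      rw [if_neg hm]
      simp only [pvStepA]
      rw [if_neg (by rw [hc]; simp), PySem.Dict.items_insert_of_not_contains _ _ hc, ih]
      rw [List.map_append]
      congr 1
      · apply List.map_congr_left
        intro s hs
        have hss : s ≠ s0 := by
          intro hh
          exact hm (hh ▸ (PySem.List.mem_dedup _ _).mp hs)
        rw [pvEntries_append_ne xs (s0, t0) s hss]
      · simp only [List.map_cons, List.map_nil]
        have hE : pvEntries (xs ++ [(s0, t0)]) s0 = [(t0, 1)] := by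
          have hfilt : xs.filter (fun q => q.1 == s0) = [] := by
            rw [List.filter_eq_nil_iff]
            intro q hq
            simp only [beq_iff_eq]
            intro hh
            exact hm (hh ▸ List.mem_map_of_mem hq)
          have hcnt0 : xs.count (s0, t0) = 0 := by
            rw [List.count_eq_zero]
            intro hmem2
            exact hm (List.mem_map_of_mem hmem2)
          unfold pvEntries pvTg
          rw [List.filter_append, hfilt]
          simp [List.count_append, hcnt0]
          rfl
        rw [hE]
        rfl

def pvMaxW (m : Int) (l : List (String × Int)) : Int := l.foldl (fun m kv => max m kv.2) m

theorem le_pvMaxW (l : List (String × Int)) (m : Int) : m ≤ pvMaxW m l := by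
  induction l generalizing m with
  | nil => simp [pvMaxW]
  | cons kv l ih =>
    simp only [pvMaxW, List.foldl_cons] at *
    exact le_trans (le_max_left m kv.2) (ih _)

theorem pvMaxW_eq_iff (l : List (String × Int)) (m : Int) :
    pvMaxW m l = m ↔ l.all (fun kv => kv.2 ≤ m) = true := by
  induction l generalizing m with
  | nil => simp [pvMaxW]
  | cons kv l ih =>
    simp only [pvMaxW, List.foldl_cons, List.all_cons, Bool.and_eq_true, decide_eq_true_eq]
    constructor
    · intro h
      have h1 : max m kv.2 ≤ pvMaxW (max m kv.2) l := le_pvMaxW _ _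
      rw [show l.foldl (fun m kv => max m kv.2) (max m kv.2) = pvMaxW (max m kv.2) l from rfl] at h
      have hle : kv.2 ≤ m := by omega
      have : max m kv.2 = m := by omega
      rw [this] at h
      exact ⟨hle, (ih m).mp h⟩
    · rintro ⟨h1, h2⟩
      have : max m kv.2 = m := by omega
      rw [show l.foldl (fun m kv => max m kv.2) (max m kv.2) = pvMaxW (max m kv.2) l from rfl, this]
      exact (ih m).mpr h2

-- A's running-max loop = "filter by the maximum", for any start state
theorem pvSel_eq (l : List (String × Int)) (rs₀ : List String) (m₀ : Int) :
    l.foldl pvSelStep (rs₀, m₀)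
      = ((if l.all (fun kv => kv.2 ≤ m₀) then rs₀ else [])
           ++ (l.filter (fun kv => kv.2 == pvMaxW m₀ l)).map (·.1), pvMaxW m₀ l) := by
  induction l generalizing rs₀ m₀ with
  | nil => simp [pvMaxW]
  | cons kv l ih =>
    have hM : pvMaxW m₀ (kv :: l) = pvMaxW (max m₀ kv.2) l := rfl
    simp only [List.foldl_cons, List.all_cons, List.filter_cons, pvSelStep, hM]
    by_cases hgt : kv.2 > m₀
    · have hmax : max m₀ kv.2 = kv.2 := by omega
      rw [if_pos hgt, hmax, ih]
      by_cases hall : (l.all fun kv' => decide (kv'.2 ≤ kv.2)) = true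
      · have hMv : pvMaxW kv.2 l = kv.2 := (pvMaxW_eq_iff l kv.2).mpr hall
        simp [hall, hMv, not_le.mpr hgt]
      · have hMv : pvMaxW kv.2 l ≠ kv.2 := fun h => hall ((pvMaxW_eq_iff l kv.2).mp h)
        simp [hall, not_le.mpr hgt, Ne.symm hMv]
    · have hmax : max m₀ kv.2 = m₀ := by omega
      rw [if_neg hgt, hmax]
      by_cases heq : (kv.2 == m₀) = true
      · have hkv : kv.2 = m₀ := by simpa using heq
        rw [if_pos heq, ih]
        by_cases hall : (l.all fun kv' => decide (kv'.2 ≤ m₀)) = true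
        · have hMv : pvMaxW m₀ l = m₀ := (pvMaxW_eq_iff l m₀).mpr hall
          simp [hall, hMv, hkv]
        · have hMv : pvMaxW m₀ l ≠ m₀ := fun h => hall ((pvMaxW_eq_iff l m₀).mp h)
          have hne : kv.2 ≠ pvMaxW m₀ l := by rw [hkv]; exact Ne.symm hMv
          simp [hall, hne]
      · have hkv : kv.2 ≠ m₀ := by simpa using heq
        have hlt : kv.2 < m₀ := by omega
        rw [if_neg heq, ih]
        have hne : kv.2 ≠ pvMaxW m₀ l := by have := le_pvMaxW l m₀; omega
        by_cases hall : (l.all fun kv' => decide (kv'.2 ≤ m₀)) = true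
        · simp [hall, hne, le_of_lt hlt]
        · simp [hall, hne, le_of_lt hlt]

theorem pvE_pos (pairs : List (String × String)) (s : String) :
    ∀ kv ∈ pvEntries pairs s, 0 < kv.2 := by
  intro kv hkv
  unfold pvEntries at hkv
  obtain ⟨t, ht, rfl⟩ := List.mem_map.mp hkv
  simp only
  have ht' : t ∈ (pairs.filter (fun q => q.1 == s)).map (·.2) :=
    (PySem.List.mem_dedup _ _).mp ht
  obtain ⟨q, hq, rfl⟩ := List.mem_map.mp ht'
  have hqf := List.mem_filter.mp hq
  have h1 : q.1 = s := by simpa using hqf.2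
  have hmem : (s, q.2) ∈ pairs := by
    have : q = (s, q.2) := by rw [Prod.ext_iff]; exact ⟨h1, rfl⟩
    exact this ▸ hqf.1
  exact_mod_cast List.count_pos_iff.mpr hmem

theorem pvEmit {β : Type} (l : List β) (P : β → Bool) (f g : β → String) :
    ∀ r : List String × List String,
      l.foldl (fun r q => if P q then (r.1 ++ [f q], r.2 ++ [g q]) else r) r
        = (r.1 ++ (l.filter P).map f, r.2 ++ (l.filter P).map g) := by
  induction l with
  | nil => intro r; simp
  | cons x l ih =>
    intro r
    rw [List.foldl_cons, List.filter_cons]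
    by_cases hp : P x
    · rw [if_pos hp, if_pos hp, ih]; simp
    · rw [if_neg hp, if_neg hp, ih]

theorem pvEmitA (sel : List String) (s : String) : ∀ r : List String × List String,
    sel.foldl (fun r t => (r.1 ++ [s], r.2 ++ [t])) r
      = (r.1 ++ sel.map (fun _ => s), r.2 ++ sel) := by
  induction sel with
  | nil => intro r; simp
  | cons t sel ih =>
    intro r
    rw [List.foldl_cons, ih]
    simp

-- the sources B's outer loop actually processes, given the 'done' list so far
def pvNews (srcs done : List String) : List String :=
  match srcs with
  | [] => []
  | s :: srcs => if done.contains s then pvNews srcs done else s :: pvNews srcs (done ++ [s])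

theorem pvSetFold (srcs acc : List String) :
    srcs.foldl PySem.Set.add acc = acc ++ pvNews srcs acc := by
  induction srcs generalizing acc with
  | nil => simp [pvNews]
  | cons s srcs ih =>
    rw [List.foldl_cons, pvNews]
    show srcs.foldl PySem.Set.add (PySem.Set.add acc s) = _
    rw [PySem.Set.add]
    have hc : PySem.Set.contains acc s = acc.contains s := by
      simp [PySem.Set.contains]
    rw [hc]
    by_cases h : acc.contains s
    · rw [if_pos h, if_pos h, ih]
    · rw [if_neg h, if_neg h, ih]
      simp

theorem pvNews_dedup (srcs : List String) : pvNews srcs [] = PySem.List.dedup srcs := by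
  have h := pvSetFold srcs []
  simp only [List.nil_append] at h
  rw [← h]
  rfl

-- B's targets scan computes pvTg
theorem pvTargetsFold (pairs : List (String × String)) (s : String) (acc : List String) :
    pairs.foldl (fun ts q => if q.1 == s && !(ts.contains q.2) then ts ++ [q.2] else ts) acc
      = ((pairs.filter (fun q => q.1 == s)).map (·.2)).foldl PySem.Set.add acc := by
  induction pairs generalizing acc with
  | nil => rfl
  | cons q pairs ih =>
    rw [List.foldl_cons, List.filter_cons]
    by_cases hq : (q.1 == s) = true
    · rw [if_pos hq, List.map_cons, List.foldl_cons]
      have : (if q.1 == s && !(acc.contains q.2) then acc ++ [q.2] else acc)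
          = PySem.Set.add acc q.2 := by
        rw [PySem.Set.add]
        have hc : PySem.Set.contains acc q.2 = acc.contains q.2 := by
          simp [PySem.Set.contains]
        rw [hc, hq]
        by_cases h : acc.contains q.2 <;> simp [h]
      rw [this, ih]
    · rw [if_neg hq]
      have : (if q.1 == s && !(acc.contains q.2) then acc ++ [q.2] else acc) = acc := by
        simp only [Bool.eq_false_iff] at hq
        simp [hq]
      rw [this, ih]

theorem pvTargets (pairs : List (String × String)) (s : String) :
    pairs.foldl (fun ts q => if q.1 == s && !(ts.contains q.2) then ts ++ [q.2] else ts)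
        ([] : List String)
      = pvTg pairs s := by
  rw [pvTargetsFold]
  have h := pvSetFold ((pairs.filter (fun q => q.1 == s)).map (·.2)) []
  simp only [List.nil_append] at h
  rw [h, pvNews_dedup]
  rfl

-- max(...) of a nonempty positive list with .getD 0 = the running max from 0
theorem pvMax_getD (cs : List Int) (hne : cs ≠ []) (hpos : ∀ c ∈ cs, 0 < c) :
    (PySem.List.max? cs (fun y => y)).getD 0 = cs.foldl (fun a b => max a b) 0 := by
  cases cs with
  | nil => exact absurd rfl hne
  | cons c cs =>
    rw [PySem.List.max?_id_cons]
    simp only [Option.getD_some, List.foldl_cons]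
    have hc : 0 < c := hpos c List.mem_cons_self
    rw [show max (0 : Int) c = c from by omega]

-- B's outer fold, unrolled to the per-new-source bodies
theorem pvOuter (pairs rest : List (String × String)) (done : List String)
    (r : List String × List String) :
    rest.foldl (pvStepB pairs) (done, r)
      = (done ++ pvNews (rest.map (·.1)) done,
         (pvNews (rest.map (·.1)) done).foldl (pvBodyB pairs) r) := by
  induction rest generalizing done r with
  | nil => simp [pvNews]
  | cons p rest ih =>
    rw [List.foldl_cons, List.map_cons, pvNews]
    by_cases h : done.contains p.1
    · rw [if_pos h]
      have hstep : pvStepB pairs (done, r) p = (done, r) := by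
        simp only [pvStepB, if_pos h]
      rw [hstep, ih]
    · rw [if_neg h]
      have hstep : pvStepB pairs (done, r) p = (done ++ [p.1], pvBodyB pairs r p.1) := by
        simp only [pvStepB, if_neg h]
      rw [hstep, ih]
      simp

-- A's per-source body = B's per-source body, for any source occurring in pairs
theorem pvBody_eq (pairs : List (String × String)) (s : String)
    (hs : s ∈ pairs.map (·.1)) (r : List String × List String) :
    ((pvEntries pairs s).foldl pvSelStep (([] : List String), (0 : Int))).1.foldl
        (fun r t => (r.1 ++ [s], r.2 ++ [t])) r
      = pvBodyB pairs r s := by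
  have htg_ne : pvTg pairs s ≠ [] := by
    obtain ⟨q, hq, he⟩ := List.mem_map.mp hs
    have hqf : q ∈ pairs.filter (fun q' => q'.1 == s) :=
      List.mem_filter.mpr ⟨hq, by simp [he]⟩
    have : q.2 ∈ pvTg pairs s :=
      (PySem.List.mem_dedup _ _).mpr (List.mem_map_of_mem hqf)
    exact List.ne_nil_of_mem this
  simp only [pvBodyB, pvTargets]
  -- the list of counts B maximizes is the entries' count column
  have hcs : (pvTg pairs s).map (fun t => (PySem.List.count pairs (s, t) : Int))
      = (pvEntries pairs s).map (·.2) := by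
    unfold pvEntries
    rw [List.map_map]
    apply List.map_congr_left
    intro t _
    simp [PySem.List.count]
  have hcs_ne : (pvEntries pairs s).map (·.2) ≠ [] := by
    unfold pvEntries
    simp [htg_ne]
  have hpos : ∀ c ∈ (pvEntries pairs s).map (·.2), 0 < c := by
    intro c hc
    obtain ⟨kv, hkv, rfl⟩ := List.mem_map.mp hc
    exact pvE_pos pairs s kv hkv
  have hm : ((PySem.List.max? ((pvTg pairs s).map (fun t => (PySem.List.count pairs (s, t) : Int)))
        (fun y => y)).getD 0) = pvMaxW 0 (pvEntries pairs s) := by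
    rw [hcs, pvMax_getD _ hcs_ne hpos, pvMaxW, List.foldl_map]
  rw [hm]
  -- A's selection = filter by the max
  have hsel : ((pvEntries pairs s).foldl pvSelStep (([] : List String), (0 : Int))).1
      = ((pvEntries pairs s).filter (fun kv => kv.2 == pvMaxW 0 (pvEntries pairs s))).map (·.1) := by
    rw [pvSel_eq]
    simp [ite_self]
  rw [hsel, pvEmitA, pvEmit]
  -- B's filter over targets = A's filter over entries, projected
  have hfilt : ∀ M : Int, ((pvEntries pairs s).filter
        (fun kv => kv.2 == M)).map (·.1)
      = (pvTg pairs s).filter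
          (fun t => (PySem.List.count pairs (s, t) : Int) == M) := by
    intro M
    unfold pvEntries
    rw [List.filter_map, List.map_map]
    have h1 : ((fun kv : String × Int => kv.2 == M)
        ∘ fun t => (t, (pairs.count (s, t) : Int)))
        = fun t => (PySem.List.count pairs (s, t) : Int) == M := by
      funext t
      simp [PySem.List.count]
    have h2 : ((fun kv : String × Int => kv.1) ∘ fun t => (t, (pairs.count (s, t) : Int)))
        = fun t => t := rfl
    rw [h1, h2, List.map_id']
  rw [hfilt]
  all_goals simp

-- the two programs agree on any pair list
theorem pvMain (pairs : List (String × String)) :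
    (pairs.foldl pvStepA PySem.Dict.empty).items.foldl
      (fun r pr =>
        let sel := (pr.2.items.foldl pvSelStep (([] : List String), (0 : Int))).1
        sel.foldl (fun r t => (r.1 ++ [pr.1], r.2 ++ [t])) r)
      ([], [])
    = (pairs.foldl (pvStepB pairs)
        (([] : List String), (([] : List String), ([] : List String)))).2 := by
  rw [pvGroupA_items, List.foldl_map, pvOuter, pvNews_dedup]
  apply PySem.List.foldl_congr_mem
  intro r s hs
  have hs' : s ∈ pairs.map (·.1) := (PySem.List.mem_dedup _ _).mp hs
  exact pvBody_eq pairs s hs' r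

-- ===== VERDICT (by name: the statement is the Claim_ definition above) =====
theorem maxfreq_filter_core_spec : Claim_equal_maxfreq_filter_core := by
  intro ls lt _
  show maxfreq_filter_core ls lt = maxfreq_filter_core_alt ls lt
  exact pvMain (ls.zip lt)
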